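-- pv_equiv track=rewrite | github.com/matln/CDMA | v2/speakernet/utils/utils.py | convert_to_yaml
-- ===== SOURCE A (Python) =====
-- def convert_dict_to_yaml(nested_dict: {}, indent=4):
--     yaml_string = ""
--
--     def _convert_dict(_nested_dict, _yaml_string, nested_layer, indent=4):
--         for key, value in _nested_dict.items():
--             if type(value) == dict:
--                 _yaml_string += "\n{}{}:".format(" " * indent * nested_layer, key)
--                 _yaml_string = _convert_dict(value, _yaml_string, nested_layer + 1, indent=indent)
--             else:
--                 _yaml_string += "\n{}{}: {}".format(" " * indent * nested_layer, key, value)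
--         return _yaml_string
--
--     yaml_string = _convert_dict(nested_dict, yaml_string, 0, indent=indent)
--
--     return yaml_string.strip()
--
-- def convert_to_yaml(overrides, indent=4):
--     """Convert args to yaml for overrides. Handle '--arg=val' and '--arg val' type args
--        indent: yaml indent
--     """
--     # Construct nested dict
--     yaml_dict = {}
--     for arg in overrides:
--         arg = arg.replace("--", "")
--         if "=" in arg:
--             keys, value = arg.split("=")
--         elif " " in arg:
--             keys, value = arg.split(" ")
--         else:
--             raise ValueError
--         keys = keys.split(".")
--         _yaml_dict = yaml_dict
--         key = keys.pop(0)
--         while keys: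
--             _yaml_dict = _yaml_dict.setdefault(key, {})
--             key = keys.pop(0)
--         _yaml_dict[key] = value
--
--     # Construct yaml string
--     yaml_string = convert_dict_to_yaml(yaml_dict, indent=indent)
--
--     return yaml_string
-- ===== SOURCE B (Python) =====
-- def convert_to_yaml(overrides, indent=4):
--     """Convert args to yaml for overrides. Handle '--arg=val' and '--arg val' type args
--        indent: yaml indent
--     """
--     # Construct nested dict (recursive insert instead of a pointer walk)
--     def _insert(d, keys, value):
--         if len(keys) == 1:
--             d[keys[0]] = value
--         else:
--             _insert(d.setdefault(keys[0], {}), keys[1:], value)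
--
--     yaml_dict = {}
--     for arg in overrides:
--         arg = arg.replace("--", "")
--         if "=" in arg:
--             keys, value = arg.split("=")
--         elif " " in arg:
--             keys, value = arg.split(" ")
--         else:
--             raise ValueError
--         _insert(yaml_dict, keys.split("."), value)
--
--     # Serialize iteratively with an explicit stack (pre-order, no recursion)
--     out = ""
--     stack = [(k, v, 0) for k, v in reversed(list(yaml_dict.items()))]
--     while stack:
--         key, value, depth = stack.pop()
--         pad = " " * indent * depth
--         if type(value) == dict:
--             out += "\n{}{}:".format(pad, key)
--             stack.extend((k, v, depth + 1) for k, v in reversed(list(value.items())))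
--         else:
--             out += "\n{}{}: {}".format(pad, key, value)
--     return out.strip()
-- ===== Notes on version B (the rewrite author's own statement) =====
-- stated objective: alternative
-- what changed: The nested-dict serialization is rewritten iteratively with an explicit stack of (key, value, depth) entries (pre-order, reverse pushes) instead of A's recursive accumulator function, and insertion uses a small recursive helper instead of A's pointer-walking while loop.
import Mathlib
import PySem

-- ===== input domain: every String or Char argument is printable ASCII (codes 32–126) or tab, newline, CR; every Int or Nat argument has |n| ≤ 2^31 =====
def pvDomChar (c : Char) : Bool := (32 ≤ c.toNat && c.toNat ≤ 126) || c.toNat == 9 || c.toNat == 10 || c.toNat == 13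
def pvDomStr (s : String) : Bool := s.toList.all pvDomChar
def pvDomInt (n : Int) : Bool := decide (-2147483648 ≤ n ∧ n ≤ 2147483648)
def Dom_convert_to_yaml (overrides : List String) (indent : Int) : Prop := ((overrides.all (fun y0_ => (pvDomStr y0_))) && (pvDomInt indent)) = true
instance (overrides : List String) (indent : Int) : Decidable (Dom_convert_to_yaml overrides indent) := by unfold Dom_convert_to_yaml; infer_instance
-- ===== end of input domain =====

-- B serializes the nested dict iteratively with an explicit stack instead of A's
-- recursive accumulator function; the parsing phase keeps A's split semantics.
-- Equivalence is about the return value only (neither version mutates its arguments).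

-- The nested dict: values are either strings (leaves) or nested dicts (entry lists
-- in insertion order).  A mutual pair avoids a nested inductive.
mutual
inductive YTree : Type where
  | leaf : String → YTree
  | node : YEnts → YTree
inductive YEnts : Type where
  | nil : YEnts
  | cons : String → YTree → YEnts → YEnts
end

-- dict primitives shared by both ports (Python dict semantics on YEnts):
-- overwrite in place if the key is present, else append at the end
def ymSet : YEnts → String → YTree → YEnts
  | .nil, k, v => .cons k v .nil
  | .cons k' v' es, k, v =>
      if k' = k then .cons k' v es else .cons k' v' (ymSet es k v)

-- first value stored under a key (dict lookup)
def ymGet : YEnts → String → Option YTree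
  | .nil, _ => none
  | .cons k' v' es, k => if k' = k then some v' else ymGet es k

-- " " * indent * nested_layer (Python: a negative repeat count gives "")
def pvPad (indent layer : Int) : String := String.ofList (List.replicate (indent * layer).toNat ' ')

-- shared arg parsing ('--' removed, split on exactly one '=' or else one ' ', keys split on '.');
-- none where Python raises ValueError (no separator, or unpacking ≠ 2 pieces) — excluded by Pre_
def pvParseArg (arg : String) : Option (List String × String) :=
  let a := PySem.Str.replace arg "--" ""
  if PySem.Str.isIn "=" a then
    match PySem.Str.split? a "=" with
    | some [keys, value] => some ((PySem.Str.split? keys ".").getD [], value)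
    | _ => none
  else if PySem.Str.isIn " " a then
    match PySem.Str.split? a " " with
    | some [keys, value] => some ((PySem.Str.split? keys ".").getD [], value)
    | _ => none
  else none

-- ===== PORT A =====
-- the while loop over 'keys' with a moving '_yaml_dict' pointer, rebuilt functionally;
-- when setdefault meets a leaf Python raises TypeError (excluded by Pre_): here the leaf
-- is overwritten by a fresh dict
def pvA_setPath (es : YEnts) (key : String) (keys : List String) (v : String) : YEnts :=
  match keys with
  | [] => ymSet es key (.leaf v)
  | k2 :: rest =>
      let child := match ymGet es key with
        | some (.node es') => es'
        | _ => .nil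
      ymSet es key (.node (pvA_setPath child k2 rest v))

-- _convert_dict: recursive serialization with a threaded string accumulator
def pvA_conv : YEnts → String → Int → Int → String
  | .nil, s, _, _ => s
  | .cons key value es, s, layer, indent =>
      match value with
      | .node es' =>
          pvA_conv es (pvA_conv es' (s ++ ("\n" ++ pvPad indent layer ++ key ++ ":")) (layer + 1) indent) layer indent
      | .leaf val =>
          pvA_conv es (s ++ ("\n" ++ pvPad indent layer ++ key ++ ": " ++ val)) layer indent

def convert_to_yaml (overrides : List String) (indent : Int) : String :=
  let yaml_dict := overrides.foldl (fun es arg =>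
    match pvParseArg arg with
    | some (k :: keys, v) => pvA_setPath es k keys v
    | _ => es) YEnts.nil
  PySem.Str.strip (pvA_conv yaml_dict "" 0 indent)

-- ===== PORT B =====
-- _insert: recursive insertion along the key path
def pvB_insert (es : YEnts) (keys : List String) (v : String) : YEnts :=
  match keys with
  | [] => es
  | [k] => ymSet es k (.leaf v)
  | k :: rest =>
      let child := match ymGet es k with
        | some (.node es') => es'
        | _ => .nil
      ymSet es k (.node (pvB_insert child rest v))

-- the stack entries pushed for one dict: its items, each tagged with its depth
def pvB_items : YEnts → Int → List (String × YTree × Int)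
  | .nil, _ => []
  | .cons k v es, d => (k, v, d) :: pvB_items es d

mutual
def pvTSize : YTree → Nat
  | .leaf _ => 1
  | .node es => 1 + pvESize es
def pvESize : YEnts → Nat
  | .nil => 0
  | .cons _ v es => pvTSize v + pvESize es
end

def pvStackSize (stack : List (String × YTree × Int)) : Nat :=
  (stack.map (fun e => pvTSize e.2.1)).sum

theorem pvStackSize_append (a b : List (String × YTree × Int)) :
    pvStackSize (a ++ b) = pvStackSize a + pvStackSize b := by
  simp [pvStackSize]

theorem pvStackSize_cons (e : String × YTree × Int) (rest : List (String × YTree × Int)) :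
    pvStackSize (e :: rest) = pvTSize e.2.1 + pvStackSize rest := by
  simp [pvStackSize]

theorem pvStackSize_items : (es : YEnts) → (d : Int) → pvStackSize (pvB_items es d) = pvESize es
  | .nil, _ => by simp [pvB_items, pvStackSize, pvESize]
  | .cons k v es, d => by
      rw [pvB_items, pvStackSize_cons, pvStackSize_items es d, pvESize]

-- the iterative serializer: pop the top entry, emit its line, push a dict's items
def pvB_ser (stack : List (String × YTree × Int)) (out : String) (indent : Int) : String :=
  match stack with
  | [] => out
  | (key, value, depth) :: rest =>
      match value with
      | .node es =>
          pvB_ser (pvB_items es (depth + 1) ++ rest) (out ++ ("\n" ++ pvPad indent depth ++ key ++ ":")) indent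
      | .leaf val =>
          pvB_ser rest (out ++ ("\n" ++ pvPad indent depth ++ key ++ ": " ++ val)) indent
termination_by pvStackSize stack
decreasing_by
  · rw [pvStackSize_append, pvStackSize_items, pvStackSize_cons]
    simp only [pvTSize]; omega
  · rw [pvStackSize_cons]; simp only [pvTSize]; omega

def convert_to_yaml_alt (overrides : List String) (indent : Int) : String :=
  let yaml_dict := overrides.foldl (fun es arg =>
    match pvParseArg arg with
    | some (keys, v) => pvB_insert es keys v
    | none => es) YEnts.nil
  PySem.Str.strip (pvB_ser (pvB_items yaml_dict 0) "" indent)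

-- ===== PRECONDITION & SPEC =====
-- per-arg shape check: after removing '--', exactly one '=' or (no '=' and) exactly one ' '
def pvArgOK (arg : String) : Bool :=
  let a := PySem.Str.replace arg "--" ""
  PySem.Str.count a "=" == 1 || (PySem.Str.count a "=" == 0 && PySem.Str.count a " " == 1)

-- the dotted key path of an arg (string shape only)
def pvPath (arg : String) : List String :=
  let a := PySem.Str.replace arg "--" ""
  let keys := if PySem.Str.isIn "=" a then (((PySem.Str.split? a "=").getD []).headD "")
              else (((PySem.Str.split? a " ").getD []).headD "")
  (PySem.Str.split? keys ".").getD []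

-- Pre_ excludes exactly the inputs where A raises: an arg without exactly one separator
-- (ValueError) or an earlier arg whose key path is a proper prefix of a later one's
-- (TypeError: a string is reached where a dict is expected).
def Pre_convert_to_yaml (overrides : List String) (indent : Int) : Prop :=
  overrides.all pvArgOK = true ∧
  (overrides.map pvPath).Pairwise (fun p q => ¬ (p <+: q ∧ p ≠ q))
instance (overrides : List String) (indent : Int) : Decidable (Pre_convert_to_yaml overrides indent) := by
  unfold Pre_convert_to_yaml; infer_instance

def pvWitness_convert_to_yaml : List String × Int := (["--a.b=1", "--c 2"], 4)

def Spec_convert_to_yaml (overrides : List String) (indent : Int) (out : String) : Prop := out = convert_to_yaml_alt overrides indent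
instance (overrides : List String) (indent : Int) (out : String) : Decidable (Spec_convert_to_yaml overrides indent out) := by unfold Spec_convert_to_yaml; infer_instance

-- ===== CLAIM (what is proved, stated in full; the proofs are below) =====
def Claim_equal_convert_to_yaml : Prop := ∀ (overrides : List String) (indent : Int), Dom_convert_to_yaml overrides indent → Pre_convert_to_yaml overrides indent → Spec_convert_to_yaml overrides indent (convert_to_yaml overrides indent)

-- ===== LEMMAS AND PROOFS =====

theorem pvTSize_pos (v : YTree) : 0 < pvTSize v := by
  cases v <;> simp [pvTSize]

-- the two insertion routines build the same dict
theorem insert_eq (keys : List String) : ∀ (es : YEnts) (k v : String),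
    pvA_setPath es k keys v = pvB_insert es (k :: keys) v := by
  induction keys with
  | nil => intro es k v; simp [pvA_setPath, pvB_insert]
  | cons k2 rest ih =>
      intro es k v
      simp only [pvA_setPath, pvB_insert]
      rw [ih]

-- draining a dict's items off the stack equals A's recursive serialization of that dict
theorem ser_eq (n : Nat) : ∀ (es : YEnts), pvESize es ≤ n →
    ∀ (d : Int) (s : String) (rest : List (String × YTree × Int)) (ind : Int),
    pvB_ser (pvB_items es d ++ rest) s ind = pvB_ser rest (pvA_conv es s d ind) ind := by
  induction n with
  | zero =>
      intro es h d s rest ind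
      cases es with
      | nil => simp [pvB_items, pvA_conv]
      | cons k v es =>
          exfalso; have := pvTSize_pos v
          simp [pvESize] at h; omega
  | succ n ih =>
      intro es h d s rest ind
      cases es with
      | nil => simp [pvB_items, pvA_conv]
      | cons k v es =>
          cases v with
          | leaf val =>
              simp only [pvB_items, List.cons_append, pvB_ser, pvA_conv]
              exact ih es (by simp [pvESize, pvTSize] at h ⊢; omega) d _ rest ind
          | node es' =>
              simp only [pvB_items, List.cons_append, pvB_ser, pvA_conv]
              rw [ih es' (by simp [pvESize, pvTSize] at h ⊢; omega) (d + 1)]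
              exact ih es (by simp [pvESize, pvTSize] at h ⊢; omega) d _ rest ind

-- the two parsing folds build the same dict
theorem fold_eq (overrides : List String) :
    overrides.foldl (fun es arg =>
      match pvParseArg arg with
      | some (k :: keys, v) => pvA_setPath es k keys v
      | _ => es) YEnts.nil
    = overrides.foldl (fun es arg =>
      match pvParseArg arg with
      | some (keys, v) => pvB_insert es keys v
      | none => es) YEnts.nil := by
  have hf : ∀ (es : YEnts) (arg : String),
      (match pvParseArg arg with
        | some (k :: keys, v) => pvA_setPath es k keys v
        | _ => es)
      = (match pvParseArg arg with
        | some (keys, v) => pvB_insert es keys v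
        | none => es) := by
    intro es arg
    cases hp : pvParseArg arg with
    | none => simp
    | some p =>
        obtain ⟨keys, v⟩ := p
        cases keys with
        | nil => simp [pvB_insert]
        | cons k rest => simp [insert_eq]
  have hl : ∀ (l : List String) (es : YEnts),
      l.foldl (fun es arg =>
        match pvParseArg arg with
        | some (k :: keys, v) => pvA_setPath es k keys v
        | _ => es) es
      = l.foldl (fun es arg =>
        match pvParseArg arg with
        | some (keys, v) => pvB_insert es keys v
        | none => es) es := by
    intro l
    induction l with
    | nil => intro es; rfl
    | cons a l ih => intro es; rw [List.foldl_cons, List.foldl_cons, hf]; exact ih _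
  exact hl overrides YEnts.nil

-- ===== VERDICT (by name: the statement is the Claim_ definition above) =====
theorem convert_to_yaml_spec : Claim_equal_convert_to_yaml := by
  intro overrides indent _ _
  unfold Spec_convert_to_yaml convert_to_yaml convert_to_yaml_alt
  rw [fold_eq]
  have h := ser_eq (pvESize (overrides.foldl (fun es arg =>
      match pvParseArg arg with
      | some (keys, v) => pvB_insert es keys v
      | none => es) YEnts.nil)) _ (le_refl _) 0 "" [] indent
  simp only [List.append_nil] at h
  rw [show ∀ (out : String) (i : Int), pvB_ser [] out i = out from fun _ _ => by rw [pvB_ser]] at h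
  exact congrArg PySem.Str.strip h.symm
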